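-- pv_equiv track=rewrite | github.com/9sub/Algorithm | 프로그래머스/1/135808. 과일 장수/과일 장수.py | solution
-- ===== SOURCE A (Python) =====
-- def solution(k, m, score):
--     score.sort(reverse=True)
--     tmp= 0
--     sum_=0
--     while tmp < len(score):
--         if len(score[tmp:tmp+m]) == m:
--             sum_ += min(score[tmp:tmp+m])*m
--         tmp += m
--
--     return sum_
-- ===== SOURCE B (Python) =====
-- def solution(k, m, score):
--     cnt = {}
--     for s in score:
--         cnt[s] = cnt.get(s, 0) + 1
--     total = 0
--     seen = 0
--     for v in sorted(cnt, reverse=True):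
--         c = cnt[v]
--         total += ((seen + c) // m - seen // m) * v * m
--         seen += c
--     return total
-- ===== Notes on version B (the rewrite author's own statement) =====
-- stated objective: alternative
-- what changed: A sorts the whole list descending and walks it in a while-loop taking an m-sized slice and min() per box; B never sorts the scores: it builds a value->count dictionary, sorts only the distinct values descending, and for each value computes with two floor-divisions how many box-minimum positions fall inside that value's run, adding boxes*value*m in bulk (O(n + u log u) for u distinct values instead of O(n log n)).
import Mathlib
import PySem

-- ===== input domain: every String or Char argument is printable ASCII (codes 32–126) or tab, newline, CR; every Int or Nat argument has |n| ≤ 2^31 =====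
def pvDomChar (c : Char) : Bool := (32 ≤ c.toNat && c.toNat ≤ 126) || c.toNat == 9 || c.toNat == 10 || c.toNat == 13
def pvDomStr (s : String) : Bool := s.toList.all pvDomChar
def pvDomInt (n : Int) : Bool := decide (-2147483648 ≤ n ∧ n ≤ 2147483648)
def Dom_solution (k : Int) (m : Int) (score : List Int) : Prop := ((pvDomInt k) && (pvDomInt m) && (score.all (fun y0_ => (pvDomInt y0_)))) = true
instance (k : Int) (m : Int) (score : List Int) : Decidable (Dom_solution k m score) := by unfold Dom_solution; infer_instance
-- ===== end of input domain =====

-- B replaces A's sort-everything-then-slice-and-min loop by a value→count dictionary plus a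
-- sort of the distinct values only, counting box-minimum positions per value run with two
-- floor-divisions (objective: alternative). Python A sorts `score` in place; the equivalence
-- claimed here is about the return value only.

-- ===== PORT A =====
-- A's while-loop as fuel-bounded recursion over (tmp, sum_); fuel = len(score)+1 suffices since
-- under Pre_ (1 ≤ m) tmp grows by m ≥ 1 each iteration.  min() of an empty slice (m = 0) would
-- raise ValueError in Python — excluded by Pre_ — so the port uses .getD 0 there.
def solLoop (s : List Int) (m : Int) : Nat → Int → Int → Int
  | 0, _, sum_ => sum_
  | Nat.succ fuel, tmp, sum_ =>
    if tmp < (s.length : Int) then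
      solLoop s m fuel (tmp + m)
        (if ((PySem.List.slice s (some tmp) (some (tmp + m))).length : Int) = m then
          sum_ + ((PySem.List.min? (PySem.List.slice s (some tmp) (some (tmp + m))) (fun y => y)).getD 0) * m
        else sum_)
    else sum_

def solution (k : Int) (m : Int) (score : List Int) : Int :=
  solLoop (PySem.List.sorted score (fun x => x) true) m (score.length + 1) 0 0

-- ===== PORT B =====
def solution_alt (k : Int) (m : Int) (score : List Int) : Int :=
  let cnt := score.foldl (fun d s => d.insert s (d.getD s 0 + 1)) PySem.Dict.empty
  ((PySem.List.sorted cnt.keys (fun x => x) true).foldl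
      (fun (ts : Int × Int) v =>
        (ts.1 + (PySem.Int.floordiv (ts.2 + cnt.getD v 0) m - PySem.Int.floordiv ts.2 m) * v * m,
         ts.2 + cnt.getD v 0))
      (0, 0)).1

-- ===== PRECONDITION & SPEC =====
-- Pre_ excludes m ≤ 0 with a nonempty score: there A raises ValueError (min of an empty slice,
-- m = 0) or loops forever (m < 0, tmp never reaches len); B itself would divide by zero for
-- m = 0.  A returns no value anywhere outside Pre_.
def Pre_solution (k : Int) (m : Int) (score : List Int) : Prop := 1 ≤ m ∨ score = []
instance (k : Int) (m : Int) (score : List Int) : Decidable (Pre_solution k m score) := by unfold Pre_solution; infer_instance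
def pvWitness_solution : Int × Int × List Int := (4, 2, [4, 1, 3, 2, 5])

def Spec_solution (k : Int) (m : Int) (score : List Int) (out : Int) : Prop := out = solution_alt k m score
instance (k : Int) (m : Int) (score : List Int) (out : Int) : Decidable (Spec_solution k m score out) := by unfold Spec_solution; infer_instance

-- ===== CLAIM (what is proved, stated in full; the proofs are below) =====
def Claim_equal_solution : Prop := ∀ (k : Int) (m : Int) (score : List Int), Dom_solution k m score → Pre_solution k m score → Spec_solution k m score (solution k m score)

-- ===== LEMMAS AND PROOFS =====

-- min of a full descending chunk r[t:t+M] is its last element r[t+M-1]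
lemma min_desc_chunk (r : List Int) (hr : List.Pairwise (fun a b : Int => b ≤ a) r)
    (t M : Nat) (hM : 1 ≤ M) (hfull : t + M ≤ r.length) :
    PySem.List.min? (PySem.List.slice r (some (t : Int)) (some ((t : Int) + (M : Int)))) (fun y => y)
      = some (r.getD (t + M - 1) 0) := by
  rw [PySem.List.slice_natCast_add]
  set ch : List Int := (r.drop t).take M with hch
  have hclen : ch.length = M := by
    simp [hch]; omega
  have hcp : List.Pairwise (fun a b : Int => b ≤ a) ch :=
    hr.sublist (((r.drop t).take_sublist M).trans (r.drop_sublist t))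
  have hlast_lt : M - 1 < ch.length := by omega
  have hlast_r : (ch[M - 1]'hlast_lt) = r.getD (t + M - 1) 0 := by
    simp only [hch, List.getElem_take, List.getElem_drop]
    rw [List.getD_eq_getElem]
    · congr 1; omega
    · omega
  have hmin_last : ∀ y ∈ ch, (ch[M - 1]'hlast_lt) ≤ y := by
    intro y hy
    obtain ⟨i, hi, rfl⟩ := List.mem_iff_getElem.mp hy
    rcases Nat.lt_or_ge i (M - 1) with h | h
    · exact (List.pairwise_iff_getElem.mp hcp) i (M - 1) hi hlast_lt h
    · have : i = M - 1 := by omega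
      subst this; exact le_refl _
  cases hmo : PySem.List.min? ch (fun y => y) with
  | none =>
    exfalso
    have := (PySem.List.min?_eq_none_iff (xs := ch) (key := fun y : Int => y)).mp hmo
    simp [this] at hclen; omega
  | some v =>
    have hvm := PySem.List.min?_mem hmo
    have hvmin := PySem.List.min?_isMin hmo
    have h1 : (ch[M - 1]'hlast_lt) ≤ v := hmin_last v hvm
    have h2 : v ≤ (ch[M - 1]'hlast_lt) := hvmin _ (List.getElem_mem _)
    rw [← hlast_r]
    congr 1
    omega

-- loop invariant: from tmp = t, A's loop adds M times the sum of the minima of the remaining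
-- full boxes, which sit at indices t + k*M + (M-1) of the descending list
lemma loop_eq (r : List Int) (hr : List.Pairwise (fun a b : Int => b ≤ a) r)
    (M : Nat) (hM : 1 ≤ M) :
    ∀ (fuel t : Nat) (acc : Int), r.length ≤ t + fuel * M →
      solLoop r (M : Int) fuel (t : Int) acc
        = acc + (M : Int) * ((List.range ((r.length - t) / M)).map
            (fun k => r.getD (t + k * M + (M - 1)) 0)).sum := by
  intro fuel
  induction fuel with
  | zero =>
    intro t acc hcond
    have : (r.length - t) / M = 0 := by
      have : r.length - t = 0 := by omega
      simp [this]
    simp [solLoop, this]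
  | succ fuel ih =>
    intro t acc hcond
    by_cases hlt : t < r.length
    · rw [solLoop]
      rw [if_pos (by exact_mod_cast hlt)]
      have hslice_len : (PySem.List.slice r (some (t : Int)) (some ((t : Int) + (M : Int)))).length
          = min M (r.length - t) := by
        rw [PySem.List.slice_natCast_add]
        simp
      by_cases hfull : t + M ≤ r.length
      · -- full box
        have hlen_eq : ((PySem.List.slice r (some (t:Int)) (some ((t:Int) + (M:Int)))).length : Int) = (M : Int) := by
          rw [hslice_len]; congr 1; omega
        rw [if_pos hlen_eq, min_desc_chunk r hr t M hM hfull]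
        rw [Nat.succ_mul] at hcond
        have hcast : (t : Int) + (M : Int) = ((t + M : Nat) : Int) := by push_cast; ring
        rw [hcast, ih (t + M) _ (by omega)]
        have hsub : r.length - t - M = r.length - (t + M) := by omega
        have hq : (r.length - t) / M = (r.length - (t + M)) / M + 1 := by
          rw [Nat.div_eq_sub_div (by omega) (by omega), hsub]
        rw [hq, List.range_succ_eq_map, List.map_cons, List.map_map, List.sum_cons]
        have hmapeq : (List.map ((fun k => r.getD (t + k * M + (M - 1)) 0) ∘ fun i => i + 1) (List.range ((r.length - (t + M)) / M)))
            = List.map (fun k => r.getD (t + M + k * M + (M - 1)) 0) (List.range ((r.length - (t + M)) / M)) := by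
          apply List.map_congr_left
          intro a _
          simp only [Function.comp]
          congr 2
          ring
        rw [hmapeq]
        have : t + 0 * M + (M - 1) = t + M - 1 := by omega
        rw [this]
        simp only [Option.getD_some]
        ring
      · -- partial box: fewer than M scores remain
        have hlen_ne : ¬ ((PySem.List.slice r (some (t:Int)) (some ((t:Int) + (M:Int)))).length : Int) = (M : Int) := by
          rw [hslice_len]
          intro h
          have : min M (r.length - t) = M := by exact_mod_cast h
          omega
        rw [if_neg hlen_ne]
        rw [Nat.succ_mul] at hcond
        have hcast : (t : Int) + (M : Int) = ((t + M : Nat) : Int) := by push_cast; ring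
        rw [hcast, ih (t + M) _ (by omega)]
        have h0 : (r.length - (t + M)) / M = 0 := by
          have : r.length - (t + M) = 0 := by omega
          simp [this]
        have h0' : (r.length - t) / M = 0 := Nat.div_eq_of_lt (by omega)
        simp [h0, h0']
    · rw [solLoop, if_neg (by exact_mod_cast hlt)]
      have : (r.length - t) / M = 0 := by
        have : r.length - t = 0 := by omega
        simp [this]
      simp [this]

-- the descending multiset sort as (distinct values, descending) with each value replicated
def flatRep (cf : Int → Nat) (vs : List Int) : List Int :=
  vs.flatMap (fun v => List.replicate (cf v) v)

lemma count_flatRep (cf : Int → Nat) (vs : List Int) (hnd : vs.Nodup) (b : Int) :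
    (flatRep cf vs).count b = if b ∈ vs then cf b else 0 := by
  induction vs with
  | nil => simp [flatRep]
  | cons v rest ih =>
    obtain ⟨hv, hrest⟩ := List.nodup_cons.mp hnd
    have ih' := ih hrest
    simp only [flatRep, List.flatMap_cons, List.count_append] at ih' ⊢
    rw [ih']
    by_cases hb : b = v
    · subst hb
      simp [hv]
    · simp [List.count_replicate, hb, Ne.symm hb]

lemma flat_perm (cf : Int → Nat) (vs xs : List Int) (hnd : vs.Nodup)
    (hmem : ∀ v, v ∈ vs ↔ v ∈ xs) (hcf : ∀ v, cf v = xs.count v) :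
    (flatRep cf vs).Perm xs := by
  rw [List.perm_iff_count]
  intro b
  rw [count_flatRep cf vs hnd b]
  by_cases hb : b ∈ vs
  · simp [hb, hcf b]
  · have : b ∉ xs := fun h => hb ((hmem b).mpr h)
    simp [hb, List.count_eq_zero.mpr this]

lemma flat_pairwise (cf : Int → Nat) (vs : List Int)
    (h : vs.Pairwise (fun a b : Int => b ≤ a)) :
    (flatRep cf vs).Pairwise (fun a b : Int => b ≤ a) := by
  induction vs with
  | nil => simp [flatRep]
  | cons v rest ih =>
    simp only [flatRep, List.flatMap_cons]
    rw [List.pairwise_append]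
    refine ⟨?_, ?_, ?_⟩
    · exact List.pairwise_replicate.mpr (Or.inr (le_refl v))
    · have := ih (List.pairwise_cons.mp h).2
      simpa [flatRep] using this
    · intro x hx y hy
      obtain ⟨u, hu, hyu⟩ := List.mem_flatMap.mp hy
      rw [List.eq_of_mem_replicate hx, List.eq_of_mem_replicate hyu]
      exact (List.pairwise_cons.mp h).1 u hu

-- the descending sort of `score` IS flatRep of the descending sort of its distinct values
lemma flat_eq_sorted (score : List Int) :
    flatRep (fun v => score.count v)
        (PySem.List.sorted (PySem.Dict.counter score).keys (fun x => x) true)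
      = PySem.List.sorted score (fun x => x) true := by
  set vs := PySem.List.sorted (PySem.Dict.counter score).keys (fun x => x) true with hvs
  have hperm_keys : vs.Perm (PySem.Dict.counter score).keys :=
    PySem.List.sorted_perm _ _ _
  have hnd : vs.Nodup := hperm_keys.nodup_iff.mpr (PySem.Dict.nodup_keys_counter score)
  have hmem : ∀ v, v ∈ vs ↔ v ∈ score := by
    intro v
    rw [hperm_keys.mem_iff, PySem.Dict.keys_counter]
    exact PySem.Set.mem_ofList score v
  apply List.Perm.eq_of_pairwise (le := fun a b : Int => b ≤ a)
  · intro a b _ _ h1 h2; omega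
  · exact flat_pairwise _ _ (PySem.List.sorted_pairwise_rev _ _)
  · exact PySem.List.sorted_pairwise_rev _ _
  · exact (flat_perm _ _ _ hnd hmem (fun v => rfl)).trans
      (PySem.List.sorted_perm score (fun x => x) true).symm

-- B's fold over the distinct values: starting from `seen = s`, it adds M times the value at
-- every box-minimum position q*M-1 (global index, s < q*M ≤ s + remaining) of the flat list
lemma foldB_eq (M : Nat) (hM : 1 ≤ M) (cf : Int → Nat) :
    ∀ (vs : List Int) (s : Nat) (t : Int),
      vs.foldl (fun (ts : Int × Int) v =>
          (ts.1 + (PySem.Int.floordiv (ts.2 + (cf v : Int)) (M : Int)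
                    - PySem.Int.floordiv ts.2 (M : Int)) * v * (M : Int),
           ts.2 + (cf v : Int)))
        (t, (s : Int))
      = (t + (M : Int) * ((List.range' (s / M + 1) ((s + (flatRep cf vs).length) / M - s / M)).map
            (fun q => ((flatRep cf vs).getD (q * M - 1 - s) 0 : Int))).sum,
         ((s + (flatRep cf vs).length : Nat) : Int)) := by
  intro vs
  induction vs with
  | nil =>
    intro s t
    simp [flatRep]
  | cons v rest ih =>
    intro s t
    rw [List.foldl_cons]
    have hstep : ((t, (s : Int)).1 + (PySem.Int.floordiv ((t, (s : Int)).2 + (cf v : Int)) (M : Int)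
                    - PySem.Int.floordiv (t, (s : Int)).2 (M : Int)) * v * (M : Int),
                  (t, (s : Int)).2 + (cf v : Int))
        = (t + ((((s + cf v) / M : Nat) : Int) - (((s / M : Nat) : Int))) * v * (M : Int),
           (((s + cf v : Nat) : Int))) := by
      have h1 : (s : Int) + (cf v : Int) = (((s + cf v : Nat)) : Int) := by push_cast; ring
      simp only [h1, PySem.Int.floordiv_natCast]
    rw [hstep, ih (s + cf v)]
    have hflat : flatRep cf (v :: rest) = List.replicate (cf v) v ++ flatRep cf rest := by
      simp [flatRep]
    have hlen : (flatRep cf (v :: rest)).length = cf v + (flatRep cf rest).length := by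
      rw [hflat, List.length_append, List.length_replicate]
    have hd1 : s / M ≤ (s + cf v) / M := Nat.div_le_div_right (by omega)
    have hd2 : (s + cf v) / M ≤ (s + cf v + (flatRep cf rest).length) / M :=
      Nat.div_le_div_right (by omega)
    have hassoc : s + (flatRep cf (v :: rest)).length = s + cf v + (flatRep cf rest).length := by
      omega
    have hrange : List.range' (s / M + 1) ((s + (flatRep cf (v :: rest)).length) / M - s / M)
        = List.range' (s / M + 1) ((s + cf v) / M - s / M)
          ++ List.range' ((s + cf v) / M + 1)
               ((s + cf v + (flatRep cf rest).length) / M - (s + cf v) / M) := by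
      rw [hassoc]
      have htot : (s + cf v + (flatRep cf rest).length) / M - s / M
          = ((s + cf v) / M - s / M)
            + ((s + cf v + (flatRep cf rest).length) / M - (s + cf v) / M) := by
        omega
      rw [htot, ← List.range'_append_1]
      congr 2
      omega
    rw [hrange, List.map_append, List.sum_append]
    have hMpos : 0 < M := hM
    have hsmod := Nat.div_add_mod s M
    have hsmod_lt := Nat.mod_lt s hMpos
    have hscmod := Nat.div_add_mod (s + cf v) M
    have hscmod_lt := Nat.mod_lt (s + cf v) hMpos
    -- first segment: every index lands in the replicate block, value v
    have hsum1 : ((List.range' (s / M + 1) ((s + cf v) / M - s / M)).map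
          (fun q => ((flatRep cf (v :: rest)).getD (q * M - 1 - s) 0 : Int))).sum
        = (((s + cf v) / M - s / M : Nat) : Int) * v := by
      have hmap : (List.range' (s / M + 1) ((s + cf v) / M - s / M)).map
            (fun q => ((flatRep cf (v :: rest)).getD (q * M - 1 - s) 0 : Int))
          = (List.range' (s / M + 1) ((s + cf v) / M - s / M)).map (fun _ => v) := by
        apply List.map_congr_left
        intro q hq
        obtain ⟨hq1, hq2⟩ := List.mem_range'_1.mp hq
        have hq2' : q ≤ (s + cf v) / M := by omega
        have hlow : s < q * M := by
          have h3 : (s / M + 1) * M ≤ q * M := Nat.mul_le_mul_right M hq1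
          have h4 : (s / M + 1) * M = M * (s / M) + M := by ring
          omega
        have hhigh : q * M ≤ s + cf v := by
          have h5 : q * M ≤ ((s + cf v) / M) * M := Nat.mul_le_mul_right M hq2'
          have h6 : ((s + cf v) / M) * M = M * ((s + cf v) / M) := by ring
          omega
        have hidx : q * M - 1 - s < cf v := by omega
        rw [hflat, List.getD_append _ _ _ _ (by simpa using hidx)]
        simp [hidx]
      rw [hmap, PySem.List.sum_map_const_int, List.length_range']
    -- second segment: indices land past the replicate block, in flatRep rest
    have hsum2 : ((List.range' ((s + cf v) / M + 1)
            ((s + cf v + (flatRep cf rest).length) / M - (s + cf v) / M)).map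
          (fun q => ((flatRep cf (v :: rest)).getD (q * M - 1 - s) 0 : Int))).sum
        = ((List.range' ((s + cf v) / M + 1)
            ((s + cf v + (flatRep cf rest).length) / M - (s + cf v) / M)).map
          (fun q => ((flatRep cf rest).getD (q * M - 1 - (s + cf v)) 0 : Int))).sum := by
      congr 1
      apply List.map_congr_left
      intro q hq
      obtain ⟨hq1, _⟩ := List.mem_range'_1.mp hq
      have hlow : s + cf v < q * M := by
        have h3 : ((s + cf v) / M + 1) * M ≤ q * M := Nat.mul_le_mul_right M hq1
        have h4 : ((s + cf v) / M + 1) * M = M * ((s + cf v) / M) + M := by ring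
        omega
      have hidx : cf v ≤ q * M - 1 - s := by omega
      rw [hflat, List.getD_append_right _ _ _ _ (by simpa using hidx)]
      rw [List.length_replicate]
      have hix : q * M - 1 - s - cf v = q * M - 1 - (s + cf v) := by omega
      rw [hix]
    rw [hsum1, hsum2]
    simp only [Prod.mk.injEq]
    refine ⟨?_, ?_⟩
    · have hcast : (((s + cf v) / M - s / M : Nat) : Int)
          = (((s + cf v) / M : Nat) : Int) - ((s / M : Nat) : Int) := by
        push_cast [Nat.cast_sub hd1]; ring
      rw [hcast]
      ring
    · congr 1
      omega

-- B's value, for 1 ≤ m, as M times the sum of the descending sort at the box-minimum indices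
lemma alt_eq_boxes (k : Int) (score : List Int) (M : Nat) (hM : 1 ≤ M) :
    solution_alt k (M : Int) score
      = (M : Int) * ((List.range ((PySem.List.sorted score (fun x => x) true).length / M)).map
          (fun j => (PySem.List.sorted score (fun x => x) true).getD ((1 + j) * M - 1) 0)).sum := by
  unfold solution_alt
  rw [PySem.Dict.foldl_insert_getD_add_one_eq_counter]
  simp only [PySem.Dict.getD_counter]
  have hcast0 : ((0 : Int), (0 : Int)) = ((0 : Int), ((0 : Nat) : Int)) := by norm_num
  rw [hcast0]
  rw [foldB_eq M hM (fun v => score.count v)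
    (PySem.List.sorted (PySem.Dict.counter score).keys (fun x => x) true) 0 0]
  simp only [flat_eq_sorted score]
  rw [List.range'_eq_map_range, List.map_map]
  simp only [Nat.zero_div, zero_add, Nat.sub_zero]
  simp [Function.comp_def]

-- ===== VERDICT (by name: the statement is the Claim_ definition above) =====
theorem solution_spec : Claim_equal_solution := by
  intro k m score _ hpre
  unfold Spec_solution
  rcases hpre with hm1 | hempty
  · -- main case: 1 ≤ m
    set M : Nat := m.toNat with hMdef
    have hm : m = (M : Int) := by omega
    have hM : 1 ≤ M := by omega
    set r := PySem.List.sorted score (fun x => x) true with hrdef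
    have hrp : List.Pairwise (fun a b : Int => b ≤ a) r :=
      PySem.List.sorted_pairwise_rev score (fun x => x)
    have hrlen : r.length = score.length := (PySem.List.sorted_perm score (fun x => x) true).length_eq
    have hfuel : r.length ≤ 0 + (score.length + 1) * M := by
      have h1 : (score.length + 1) * 1 ≤ (score.length + 1) * M := Nat.mul_le_mul_left _ hM
      omega
    have hA : solution k m score
        = 0 + (M : Int) * ((List.range ((r.length - 0) / M)).map
            (fun j => r.getD (0 + j * M + (M - 1)) 0)).sum := by
      unfold solution
      rw [hm, ← hrdef]
      rw [show (0 : Int) = ((0 : Nat) : Int) by simp]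
      exact loop_eq r hrp M hM (score.length + 1) 0 0 hfuel
    rw [hA, hm, alt_eq_boxes k score M hM, ← hrdef]
    rw [zero_add, Nat.sub_zero]
    congr 1
    refine congrArg List.sum (List.map_congr_left ?_)
    intro j _
    congr 1
    have h7 : (1 + j) * M = M + j * M := by ring
    omega
  · -- empty score: both sides are 0 for every m
    subst hempty
    have hnil : PySem.List.sorted ([] : List Int) (fun x : Int => x) true = [] := rfl
    simp [solution, solution_alt, solLoop, hnil]
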